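-- pv_equiv track=rewrite | github.com/xestie-beep/Ernie | memory_agent/file_adapter.py | _preferred_module_name
-- ===== SOURCE A (Python) =====
-- def _preferred_module_name(module_names: set[str]) -> str | None:
--     candidates = [candidate for candidate in module_names if candidate]
--     if not candidates:
--         return None
--     return min(
--         candidates,
--         key=lambda candidate: (candidate.count("."), len(candidate), candidate),
--     )
-- ===== SOURCE B (Python) =====
-- def _preferred_module_name(module_names: set[str]) -> str | None:
--     candidates = [candidate for candidate in module_names if candidate]
--     if not candidates:
--         return None
--     fewest_dots = min(candidate.count(".") for candidate in candidates)
--     candidates = [c for c in candidates if c.count(".") == fewest_dots]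
--     shortest = min(len(c) for c in candidates)
--     candidates = [c for c in candidates if len(c) == shortest]
--     return min(candidates)
-- ===== Notes on version B (the rewrite author's own statement) =====
-- stated objective: alternative
-- what changed: Replaces the single composite-key min scan with staged refinement: compute the minimum dot count and filter to it, then the minimum length and filter to it, then take the plain lexicographic minimum of the survivors.
import Mathlib
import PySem

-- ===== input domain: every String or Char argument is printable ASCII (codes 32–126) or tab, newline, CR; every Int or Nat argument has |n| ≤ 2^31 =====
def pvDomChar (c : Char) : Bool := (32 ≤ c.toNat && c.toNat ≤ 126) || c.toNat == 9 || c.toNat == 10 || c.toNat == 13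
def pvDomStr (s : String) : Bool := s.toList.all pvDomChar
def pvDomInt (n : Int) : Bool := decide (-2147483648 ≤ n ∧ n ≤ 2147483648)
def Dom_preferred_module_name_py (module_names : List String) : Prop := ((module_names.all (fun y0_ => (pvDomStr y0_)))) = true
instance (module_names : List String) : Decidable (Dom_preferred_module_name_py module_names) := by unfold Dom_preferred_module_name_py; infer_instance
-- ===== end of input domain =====

-- B replaces A's single-pass minimum under the composite key (dot count, length, string)
-- with staged refinement: min dot count, filter, min length, filter, plain lexicographic
-- min of the survivors (objective: alternative algorithm, same result).

-- the tuple key (c.count('.'), len(c), c) compared lexicographically, as A's min uses it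
def pvTupLt (a b : String) : Bool :=
  if PySem.Str.count a "." ≠ PySem.Str.count b "." then
    decide (PySem.Str.count a "." < PySem.Str.count b ".")
  else if PySem.Str.len a ≠ PySem.Str.len b then
    decide (PySem.Str.len a < PySem.Str.len b)
  else
    PySem.Chars.strLt a.toList b.toList   -- Python's s < t on str = '<' on s.toList (PYSEM)

-- ===== PORT A =====
-- min(candidates, key=…): running minimum, the first extremal element kept on ties
def preferred_module_name_py (module_names : List String) : Option String :=
  match module_names.filter (fun c => !(c == "")) with
  | [] => none
  | h :: t => some (t.foldl (fun m c => if pvTupLt c m then c else m) h)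

-- ===== PORT B =====
-- staged passes: min of the dot counts, filter, min of the lengths, filter, plain min
def preferred_module_name_py_alt (module_names : List String) : Option String :=
  let candidates := module_names.filter (fun c => !(c == ""))
  if candidates.isEmpty then none else
  match PySem.List.min? (candidates.map (fun c => PySem.Str.count c ".")) (fun k => k) with
  | none => none   -- unreachable: candidates is nonempty
  | some fewest_dots =>
    let cands1 := candidates.filter (fun c => PySem.Str.count c "." == fewest_dots)
    match PySem.List.min? (cands1.map (fun c => PySem.Str.len c)) (fun k => k) with
    | none => none   -- unreachable: cands1 is nonempty
    | some shortest =>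
      PySem.List.min? (cands1.filter (fun c => PySem.Str.len c == shortest)) (fun c => c)

-- ===== PRECONDITION & SPEC =====
def Spec_preferred_module_name_py (module_names : List String) (out : Option String) : Prop := out = preferred_module_name_py_alt module_names
instance (module_names : List String) (out : Option String) : Decidable (Spec_preferred_module_name_py module_names out) := by unfold Spec_preferred_module_name_py; infer_instance

-- ===== CLAIM (what is proved, stated in full; the proofs are below) =====
def Claim_equal_preferred_module_name_py : Prop := ∀ (module_names : List String), Dom_preferred_module_name_py module_names → Spec_preferred_module_name_py module_names (preferred_module_name_py module_names)

-- ===== LEMMAS AND PROOFS =====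

-- the composite key as a value in a lexicographic linear order
def pvKey (s : String) : Lex (ℕ × Lex (ℤ × List Char)) :=
  toLex (PySem.Str.count s ".", toLex (PySem.Str.len s, s.toList))

theorem pvTupLt_iff (a b : String) : pvTupLt a b = true ↔ pvKey a < pvKey b := by
  unfold pvTupLt pvKey
  rw [Prod.Lex.toLex_lt_toLex, Prod.Lex.toLex_lt_toLex]
  split_ifs with h1 h2
  · simp only [decide_eq_true_eq]
    constructor
    · exact fun h => Or.inl h
    · rintro (h | ⟨he, -⟩)
      · exact h
      · exact absurd he h1
  · simp only [decide_eq_true_eq]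
    constructor
    · exact fun h => Or.inr ⟨not_ne_iff.mp h1, Or.inl h⟩
    · rintro (h | ⟨-, (h | ⟨he, -⟩)⟩)
      · exact absurd h (not_ne_iff.mp h1 ▸ lt_irrefl _)
      · exact h
      · exact absurd he h2
  · simp only [PySem.Chars.strLt, decide_eq_true_eq]
    constructor
    · exact fun h => Or.inr ⟨not_ne_iff.mp h1, Or.inr ⟨not_ne_iff.mp h2, h⟩⟩
    · rintro (h | ⟨-, (h | ⟨-, h⟩)⟩)
      · exact absurd h (not_ne_iff.mp h1 ▸ lt_irrefl _)
      · exact absurd h (not_ne_iff.mp h2 ▸ lt_irrefl _)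
      · exact h

theorem pvKey_inj {a b : String} (h : pvKey a = pvKey b) : a = b := by
  unfold pvKey at h
  have h2 := congrArg (fun x => (ofLex x).2) h
  have h3 := congrArg (fun x => (ofLex x).2) h2
  simpa [String.toList_inj] using h3

-- A's running minimum is a member and key-minimal
theorem pvFoldA_min : ∀ (t : List String) (h : String),
    (t.foldl (fun m c => if pvTupLt c m then c else m) h) ∈ h :: t ∧
    ∀ x ∈ h :: t, pvKey (t.foldl (fun m c => if pvTupLt c m then c else m) h) ≤ pvKey x := by
  intro t
  induction t with
  | nil =>
    intro h
    refine ⟨List.mem_cons_self, ?_⟩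
    intro x hx
    simp only [List.mem_cons, List.not_mem_nil, or_false] at hx
    subst hx; exact le_refl _
  | cons y t' ih =>
    intro h
    simp only [List.foldl_cons]
    obtain ⟨hmem, hmin⟩ := ih (if pvTupLt y h then y else h)
    have hstep_le_h : pvKey (if pvTupLt y h then y else h) ≤ pvKey h := by
      by_cases hc : pvTupLt y h
      · have := le_of_lt ((pvTupLt_iff y h).mp hc)
        simpa [hc] using this
      · simp [hc]
    have hstep_le_y : pvKey (if pvTupLt y h then y else h) ≤ pvKey y := by
      by_cases hc : pvTupLt y h
      · simp [hc]
      · have : ¬ pvKey y < pvKey h := fun hlt => hc ((pvTupLt_iff y h).mpr hlt)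
        simpa [hc] using le_of_not_gt this
    constructor
    · rcases List.mem_cons.mp hmem with he | ht
      · rw [he]
        by_cases hc : pvTupLt y h <;> simp [hc]
      · exact List.mem_cons_of_mem _ (List.mem_cons_of_mem _ ht)
    · intro x hx
      have hle_step := hmin _ List.mem_cons_self
      rcases List.mem_cons.mp hx with rfl | hx'
      · exact le_trans hle_step hstep_le_h
      · rcases List.mem_cons.mp hx' with rfl | hx''
        · exact le_trans hle_step hstep_le_y
        · exact hmin x (List.mem_cons_of_mem _ hx'')

-- ===== VERDICT (by name: the statement is the Claim_ definition above) =====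
theorem preferred_module_name_py_spec : Claim_equal_preferred_module_name_py := by
  intro module_names _
  unfold Spec_preferred_module_name_py preferred_module_name_py preferred_module_name_py_alt
  cases hc : module_names.filter (fun c => !(c == "")) with
  | nil => simp
  | cons h t =>
    simp only [List.isEmpty_cons, if_false, Bool.false_eq_true]
    -- A's value and its minimality
    obtain ⟨haMem, haMin⟩ := pvFoldA_min t h
    set a := t.foldl (fun m c => if pvTupLt c m then c else m) h with ha
    -- stage 1: min of the dot counts exists
    cases hm1 : PySem.List.min? ((h :: t).map (fun c => PySem.Str.count c ".")) (fun k => k) with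
    | none =>
      exact absurd (List.map_eq_nil_iff.mp ((PySem.List.min?_eq_none_iff _ _).mp hm1)) (by simp)
    | some fewest =>
      have hfew_min : ∀ x ∈ h :: t, fewest ≤ PySem.Str.count x "." := by
        intro x hx
        exact PySem.List.min?_isMin hm1 _ (List.mem_map_of_mem hx)
      have hfew_mem : ∃ c ∈ h :: t, PySem.Str.count c "." = fewest := by
        obtain ⟨c, hcmem, hceq⟩ := List.mem_map.mp (PySem.List.min?_mem hm1)
        exact ⟨c, hcmem, hceq⟩
      cases hm2 : PySem.List.min?
          (((h :: t).filter (fun c => PySem.Str.count c "." == fewest)).map (fun c => PySem.Str.len c))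
          (fun k => k) with
      | none =>
        obtain ⟨c, hcmem, hceq⟩ := hfew_mem
        have : c ∈ (h :: t).filter (fun c => PySem.Str.count c "." == fewest) :=
          List.mem_filter.mpr ⟨hcmem, by simp only [beq_iff_eq]; exact hceq⟩
        rw [List.map_eq_nil_iff.mp ((PySem.List.min?_eq_none_iff _ _).mp hm2)] at this
        exact absurd this (List.not_mem_nil)
      | some shortest =>
        have hsh_min : ∀ x ∈ (h :: t).filter (fun c => PySem.Str.count c "." == fewest),
            shortest ≤ PySem.Str.len x := by
          intro x hx
          exact PySem.List.min?_isMin hm2 _ (List.mem_map_of_mem hx)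
        have hsh_mem : ∃ c ∈ (h :: t).filter (fun c => PySem.Str.count c "." == fewest),
            PySem.Str.len c = shortest := by
          obtain ⟨c, hcmem, hceq⟩ := List.mem_map.mp (PySem.List.min?_mem hm2)
          exact ⟨c, hcmem, hceq⟩
        cases hm3 : PySem.List.min?
            (((h :: t).filter (fun c => PySem.Str.count c "." == fewest)).filter
              (fun c => PySem.Str.len c == shortest)) (fun c => c) with
        | none =>
          obtain ⟨c, hcmem, hceq⟩ := hsh_mem
          have : c ∈ ((h :: t).filter (fun c => PySem.Str.count c "." == fewest)).filter
              (fun c => PySem.Str.len c == shortest) :=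
            List.mem_filter.mpr ⟨hcmem, by simp only [beq_iff_eq]; exact hceq⟩
          rw [(PySem.List.min?_eq_none_iff _ _).mp hm3] at this
          exact absurd this (List.not_mem_nil)
        | some z =>
          -- z's membership facts
          have hz2 := PySem.List.min?_mem hm3
          have hz1 := (List.mem_filter.mp hz2).1
          have hzcand := (List.mem_filter.mp hz1).1
          have hzcount : PySem.Str.count z "." = fewest := by
            have := (List.mem_filter.mp hz1).2; simpa only [beq_iff_eq] using this
          have hzlen : PySem.Str.len z = shortest := by
            have := (List.mem_filter.mp hz2).2; simpa only [beq_iff_eq] using this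
          -- z is key-minimal over all candidates
          have hzMin : ∀ x ∈ h :: t, pvKey z ≤ pvKey x := by
            intro x hx
            have hd : fewest ≤ PySem.Str.count x "." := hfew_min x hx
            unfold pvKey
            rw [Prod.Lex.toLex_le_toLex]
            rcases lt_or_eq_of_le hd with hdlt | hdeq
            · exact Or.inl (hzcount ▸ hdlt)
            · have hx1 : x ∈ (h :: t).filter (fun c => PySem.Str.count c "." == fewest) :=
                List.mem_filter.mpr ⟨hx, by simp only [beq_iff_eq]; exact hdeq.symm⟩
              have hl : shortest ≤ PySem.Str.len x := hsh_min x hx1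
              refine Or.inr ⟨by rw [hzcount, hdeq], ?_⟩
              rw [Prod.Lex.toLex_le_toLex]
              rcases lt_or_eq_of_le hl with hllt | hleq
              · exact Or.inl (hzlen ▸ hllt)
              · have hx2 : x ∈ ((h :: t).filter (fun c => PySem.Str.count c "." == fewest)).filter
                    (fun c => PySem.Str.len c == shortest) :=
                  List.mem_filter.mpr ⟨hx1, by simp only [beq_iff_eq]; exact hleq.symm⟩
                have : z ≤ x := PySem.List.min?_isMin hm3 x hx2
                exact Or.inr ⟨by rw [hzlen, hleq], String.le_iff_toList_le.mp this⟩
          -- antisymmetry + key injectivity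
          have h1 : pvKey a ≤ pvKey z := haMin z hzcand
          have h2 : pvKey z ≤ pvKey a := hzMin a haMem
          simp only [hm2, hm3]
          exact congrArg some (pvKey_inj (le_antisymm h1 h2))
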